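-- pv_equiv track=rewrite | github.com/Leyka/Advent-2015 | day5/day5b.py | has_sandwich_letters
-- ===== SOURCE A (Python) =====
-- def has_sandwich_letters(text):
--     """
--     It contains at least one letter which repeats with exactly one letter between them, like xyx, abcdefeghi (efe), or even aaa.
--     """
--     i = 0
--
--     while i < len(text):
--         try:
--             letter =  text[i]
--             same_letter = text[i+2]
--         except:
--             return False
--
--         if letter == same_letter:
--             return True
--         i += 1
--     return False
-- ===== SOURCE B (Python) =====
-- import re
--
-- _SANDWICH = re.compile(r'(?s)(.).\1')
--
-- def has_sandwich_letters(text):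
--     return bool(_SANDWICH.search(text))
-- ===== Notes on version B (the rewrite author's own statement) =====
-- stated objective: idiomatic
-- what changed: Replaces the explicit index loop with try/except by a single regex backreference search r'(?s)(.).\1', which matches exactly a character repeated with one arbitrary character between.
import Mathlib
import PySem

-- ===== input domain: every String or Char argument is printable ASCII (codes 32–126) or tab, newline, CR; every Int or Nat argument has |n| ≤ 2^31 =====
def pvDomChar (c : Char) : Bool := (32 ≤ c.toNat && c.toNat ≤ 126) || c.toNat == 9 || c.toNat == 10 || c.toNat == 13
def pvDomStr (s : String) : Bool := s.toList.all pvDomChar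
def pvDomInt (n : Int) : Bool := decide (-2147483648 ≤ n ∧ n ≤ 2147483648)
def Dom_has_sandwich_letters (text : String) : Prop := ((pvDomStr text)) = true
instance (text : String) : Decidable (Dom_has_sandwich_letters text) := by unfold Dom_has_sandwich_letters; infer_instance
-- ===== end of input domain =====

-- B replaces A's explicit index loop (with try/except) by one regex backreference search; same cost, more idiomatic.

-- ===== PORT A =====
-- A's while loop: at index i, text[i] and text[i+2] are fetched (the latter may raise
-- IndexError, caught => return False); if equal return True, else i += 1.
def hasSandwichLoopA (cs : List Char) (i : Nat) : Bool :=
  if h : i < cs.length then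
    match PySem.List.pyGet? cs (Int.ofNat (i + 2)) with
    | none => false                    -- IndexError on text[i+2], caught: return False
    | some c2 => if cs[i] = c2 then true else hasSandwichLoopA cs (i + 1)
  else false
termination_by cs.length - i

def has_sandwich_letters (text : String) : Bool :=
  hasSandwichLoopA text.toList 0

-- ===== PORT B =====
-- B is re.search(r'(?s)(.).\1', text): some position pairs each character with the one
-- two places later and a pair of equal characters exists.  Ported as: zip the character
-- list with itself dropped by 2 and test any equal pair.
def has_sandwich_letters_alt (text : String) : Bool :=
  ((text.toList.zip (text.toList.drop 2)).any (fun p => p.1 == p.2))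

-- ===== PRECONDITION & SPEC =====
def Spec_has_sandwich_letters (text : String) (out : Bool) : Prop := out = has_sandwich_letters_alt text
instance (text : String) (out : Bool) : Decidable (Spec_has_sandwich_letters text out) := by unfold Spec_has_sandwich_letters; infer_instance

-- ===== CLAIM (what is proved, stated in full; the proofs are below) =====
def Claim_equal_has_sandwich_letters : Prop := ∀ (text : String), Dom_has_sandwich_letters text → Spec_has_sandwich_letters text (has_sandwich_letters text)

-- ===== LEMMAS AND PROOFS =====

theorem hasSandwichLoopA_eq (cs : List Char) (i : Nat) :
    hasSandwichLoopA cs i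
      = (((cs.drop i).zip (cs.drop (i + 2))).any (fun p => p.1 == p.2)) := by
  fun_induction hasSandwichLoopA cs i with
  | case1 i h hget =>
    -- text[i+2] raised IndexError (caught): i + 2 is out of range, the zip is empty
    rw [show Int.ofNat (i + 2) = ((i + 2 : Nat) : Int) from rfl,
        PySem.List.pyGet?_natCast, List.getElem?_eq_none_iff] at hget
    simp [List.drop_eq_nil_of_le hget]
  | case2 i h hget =>
    -- cs[i] = cs[i+2]: the zip contains the equal pair (cs[i], cs[i+2])
    rw [show Int.ofNat (i + 2) = ((i + 2 : Nat) : Int) from rfl,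
        PySem.List.pyGet?_natCast] at hget
    obtain ⟨h2, hc2⟩ := List.getElem?_eq_some_iff.mp hget
    rw [List.drop_eq_getElem_cons h, List.drop_eq_getElem_cons h2,
        List.zip_cons_cons, List.any_cons]
    simp [hc2]
  | case3 i h c2 hget hc ih =>
    -- cs[i] ≠ cs[i+2]: the head pair of the zip is unequal, rest by induction
    rw [show Int.ofNat (i + 2) = ((i + 2 : Nat) : Int) from rfl,
        PySem.List.pyGet?_natCast] at hget
    obtain ⟨h2, hc2⟩ := List.getElem?_eq_some_iff.mp hget
    subst hc2
    rw [ih, List.drop_eq_getElem_cons h, List.drop_eq_getElem_cons h2,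
        List.zip_cons_cons, List.any_cons]
    simp [show i + 1 + 2 = i + 3 from rfl, hc]
  | case4 i h =>
    -- i ≥ len(text): loop never entered, drop i is empty
    simp [List.drop_eq_nil_of_le (by omega : cs.length ≤ i)]

-- ===== VERDICT (by name: the statement is the Claim_ definition above) =====
theorem has_sandwich_letters_spec : Claim_equal_has_sandwich_letters := by
  intro text _
  unfold Spec_has_sandwich_letters has_sandwich_letters has_sandwich_letters_alt
  simpa using hasSandwichLoopA_eq text.toList 0
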